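-- pv_equiv track=rewrite | github.com/tnndbtc/agent | novel_agent/modules/plot_generator.py | _parse_subplots
-- ===== SOURCE A (Python) =====
-- from typing import Dict, Any, Optional, List
--
-- def _parse_subplots(response_text: str) -> List[Dict[str, str]]:
--     """Parse subplot response into structured format."""
--     subplots = []
--     current_subplot = {}
--
--     lines = response_text.split('\n')
--     for line in lines:
--         line = line.strip()
--
--         if line.startswith('Title:'):
--             if current_subplot:
--                 subplots.append(current_subplot)
--             current_subplot = {'title': line.replace('Title:', '').strip()}
--         elif line.startswith('Description:'):
--             current_subplot['description'] = line.replace('Description:', '').strip()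
--         elif line.startswith('Connection:'):
--             current_subplot['connection'] = line.replace('Connection:', '').strip()
--         elif line.startswith('Resolution:'):
--             current_subplot['resolution'] = line.replace('Resolution:', '').strip()
--
--     if current_subplot:
--         subplots.append(current_subplot)
--
--     return subplots
-- ===== SOURCE B (Python) =====
-- from typing import Dict, Any, Optional, List
--
-- _FIELDS = (('title', 'Title:'), ('description', 'Description:'),
--            ('connection', 'Connection:'), ('resolution', 'Resolution:'))
--
-- def _field(line: str):
--     """Return (key, value) for a recognized field line, else None."""
--     for key, prefix in _FIELDS:
--         if line.startswith(prefix):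
--             return key, line.replace(prefix, '').strip()
--     return None
--
-- def _parse_subplots(response_text: str) -> List[Dict[str, str]]:
--     """Parse subplot response into structured format."""
--     lines = [l.strip() for l in response_text.split('\n')]
--     # Partition the stripped lines into segments: each segment after the first
--     # starts at a 'Title:' line; the first segment is whatever precedes one.
--     segments = []
--     while lines:
--         head, rest = lines[0], lines[1:]
--         i = next((j for j, l in enumerate(rest) if l.startswith('Title:')), len(rest))
--         segments.append([head] + rest[:i])
--         lines = rest[i:]
--     result = []
--     for seg in segments:
--         d = dict(p for p in map(_field, seg) if p is not None)
--         if d: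
--             result.append(d)
--     return result
-- ===== Notes on version B (the rewrite author's own statement) =====
-- stated objective: alternative
-- what changed: A's single stateful loop carrying an in-progress dict is replaced by a two-phase decomposition: strip all lines, partition them into segments beginning at each title line, then build each segment's dict independently from its recognized field lines and keep the non-empty dicts.
import Mathlib
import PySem

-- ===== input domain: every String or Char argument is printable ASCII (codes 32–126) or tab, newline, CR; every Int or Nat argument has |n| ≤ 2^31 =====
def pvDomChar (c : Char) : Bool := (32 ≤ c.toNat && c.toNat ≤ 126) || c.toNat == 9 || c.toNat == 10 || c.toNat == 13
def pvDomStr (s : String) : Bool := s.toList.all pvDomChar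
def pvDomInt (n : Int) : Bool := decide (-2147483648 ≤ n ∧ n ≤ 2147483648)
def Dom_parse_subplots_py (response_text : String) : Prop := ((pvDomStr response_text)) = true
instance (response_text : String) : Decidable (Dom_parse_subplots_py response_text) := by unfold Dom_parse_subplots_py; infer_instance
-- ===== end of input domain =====

-- B re-decomposes A's single stateful loop into: strip all lines, partition them into
-- segments at 'Title:' lines, and build each segment's dict independently (same return value).

-- ===== PORT A =====
-- loop body of A's `for line in lines` (branches in A's order)
def pvAStep (st : List (PySem.Dict String String) × PySem.Dict String String) (rawLine : String) :
    List (PySem.Dict String String) × PySem.Dict String String :=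
  let line := PySem.Str.strip rawLine
  if PySem.Str.startswith line "Title:" then
    let subplots := if st.2.items ≠ [] then st.1 ++ [st.2] else st.1
    (subplots, PySem.Dict.ofList [("title", PySem.Str.strip (PySem.Str.replace line "Title:" ""))])
  else if PySem.Str.startswith line "Description:" then
    (st.1, st.2.insert "description" (PySem.Str.strip (PySem.Str.replace line "Description:" "")))
  else if PySem.Str.startswith line "Connection:" then
    (st.1, st.2.insert "connection" (PySem.Str.strip (PySem.Str.replace line "Connection:" "")))
  else if PySem.Str.startswith line "Resolution:" then
    (st.1, st.2.insert "resolution" (PySem.Str.strip (PySem.Str.replace line "Resolution:" "")))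
  else st

def parse_subplots_py (response_text : String) : List (List (String × String)) :=
  -- split? is `some` because the separator "\n" is a nonempty literal
  let lines := (PySem.Str.split? response_text "\n").getD []
  let st := lines.foldl pvAStep ([], PySem.Dict.empty)
  let subplots := if st.2.items ≠ [] then st.1 ++ [st.2] else st.1
  subplots.map PySem.Dict.items

-- ===== PORT B =====
-- Source B's _field: first matching prefix, value with the prefix removed and stripped
def pvField (line : String) : Option (String × String) :=
  if PySem.Str.startswith line "Title:" then
    some ("title", PySem.Str.strip (PySem.Str.replace line "Title:" ""))
  else if PySem.Str.startswith line "Description:" then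
    some ("description", PySem.Str.strip (PySem.Str.replace line "Description:" ""))
  else if PySem.Str.startswith line "Connection:" then
    some ("connection", PySem.Str.strip (PySem.Str.replace line "Connection:" ""))
  else if PySem.Str.startswith line "Resolution:" then
    some ("resolution", PySem.Str.strip (PySem.Str.replace line "Resolution:" ""))
  else none

-- Source B's `while lines:` partition loop (the generator `next(…)` is List.findIdx?)
def pvSegments (lines : List String) : List (List String) :=
  match lines with
  | [] => []
  | head :: rest =>
    let i := (rest.findIdx? (fun l => PySem.Str.startswith l "Title:")).getD rest.length
    (head :: rest.take i) :: pvSegments (rest.drop i)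
termination_by lines.length
decreasing_by simp only [List.length_drop, List.length_cons]; omega

-- Source B's `dict(p for p in map(_field, seg) if p is not None)`
def pvSegDict (seg : List String) : PySem.Dict String String :=
  PySem.Dict.ofList (seg.filterMap pvField)

def parse_subplots_py_alt (response_text : String) : List (List (String × String)) :=
  let lines := ((PySem.Str.split? response_text "\n").getD []).map PySem.Str.strip
  let segments := pvSegments lines
  let result := segments.foldl (fun acc seg =>
    let d := pvSegDict seg
    if d.items ≠ [] then acc ++ [d] else acc) []
  result.map PySem.Dict.items

-- ===== PRECONDITION & SPEC =====
def Spec_parse_subplots_py (response_text : String) (out : List (List (String × String))) : Prop := out = parse_subplots_py_alt response_text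
instance (response_text : String) (out : List (List (String × String))) : Decidable (Spec_parse_subplots_py response_text out) := by unfold Spec_parse_subplots_py; infer_instance

-- ===== CLAIM (what is proved, stated in full; the proofs are below) =====
def Claim_equal_parse_subplots_py : Prop := ∀ (response_text : String), Dom_parse_subplots_py response_text → Spec_parse_subplots_py response_text (parse_subplots_py response_text)

-- ===== LEMMAS AND PROOFS =====

def pvTitle (l : String) : Bool := PySem.Str.startswith l "Title:"

def pvEmit (d : PySem.Dict String String) : List (PySem.Dict String String) :=
  if d.items ≠ [] then [d] else []

def pvFStep (d : PySem.Dict String String) (l : String) : PySem.Dict String String :=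
  match pvField l with
  | some kv => d.insert kv.1 kv.2
  | none => d

-- tail of A's computation, over already-stripped lines
def pvH (cur : PySem.Dict String String) : List String → List (PySem.Dict String String)
  | [] => pvEmit cur
  | l :: rest =>
    if pvTitle l then
      pvEmit cur ++ pvH (PySem.Dict.ofList [("title", PySem.Str.strip (PySem.Str.replace l "Title:" ""))]) rest
    else pvH (pvFStep cur l) rest

def pvFlatB (ls : List String) : List (PySem.Dict String String) :=
  (pvSegments ls).flatMap (fun seg => pvEmit (pvSegDict seg))

theorem pvAStep_eq (st : List (PySem.Dict String String) × PySem.Dict String String) (s : String) :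
    pvAStep st s =
      if pvTitle (PySem.Str.strip s) then
        (st.1 ++ pvEmit st.2,
         PySem.Dict.ofList [("title", PySem.Str.strip (PySem.Str.replace (PySem.Str.strip s) "Title:" ""))])
      else (st.1, pvFStep st.2 (PySem.Str.strip s)) := by
  unfold pvAStep pvFStep pvField pvTitle pvEmit
  dsimp only
  split_ifs <;> simp [PySem.Dict.ofList, PySem.Dict.update]

theorem pvFoldA_eq (ls : List String) (acc : List (PySem.Dict String String)) (cur : PySem.Dict String String) :
    (let st := ls.foldl pvAStep (acc, cur);
     if st.2.items ≠ [] then st.1 ++ [st.2] else st.1) = acc ++ pvH cur (ls.map PySem.Str.strip) := by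
  induction ls generalizing acc cur with
  | nil => simp [pvH, pvEmit]; split_ifs <;> simp
  | cons l ls ih =>
    dsimp only [List.foldl_cons, List.map_cons, pvH]
    rw [pvAStep_eq]
    by_cases h : pvTitle (PySem.Str.strip l)
    · simp only [h, if_true, ih, List.append_assoc]
    · simp only [h, if_false, ih, Bool.false_eq_true]

theorem pvH_fill (pre : List String) (rest : List String) (cur : PySem.Dict String String)
    (h : ∀ l ∈ pre, pvTitle l = false) :
    pvH cur (pre ++ rest) = pvH (pre.foldl pvFStep cur) rest := by
  induction pre generalizing cur with
  | nil => simp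
  | cons l pre ih =>
    have hl : pvTitle l = false := h l (List.mem_cons_self ..)
    simp only [List.cons_append, pvH, hl, Bool.false_eq_true, if_false, List.foldl_cons]
    exact ih _ (fun x hx => h x (List.mem_cons_of_mem _ hx))

theorem pvSegDict_fold (seg : List String) :
    pvSegDict seg = seg.foldl pvFStep PySem.Dict.empty := by
  show PySem.Dict.ofList (seg.filterMap pvField) = _
  rw [PySem.Dict.ofList]
  show List.foldl _ PySem.Dict.empty _ = _
  generalize PySem.Dict.empty = d
  induction seg generalizing d with
  | nil => rfl
  | cons l seg ih =>
    simp only [List.filterMap_cons, List.foldl_cons, pvFStep]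
    cases pvField l with
    | none => exact ih d
    | some kv => simp only [List.foldl_cons]; exact ih _

theorem pvIdx_take {α : Type} (p : α → Bool) (l : List α) :
    l.take ((l.findIdx? p).getD l.length) = l.takeWhile (fun x => !p x) := by
  induction l with
  | nil => simp
  | cons x xs ih =>
    rw [List.findIdx?_cons]
    by_cases h : p x
    · simp [h]
    · rw [if_neg h]
      cases hfi : xs.findIdx? p with
      | none =>
        rw [hfi] at ih
        simp only [Option.getD_none] at ih
        simp [h, ih]
      | some i =>
        rw [hfi] at ih
        simp only [Option.getD_some] at ih
        simp [h, ih]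

theorem pvIdx_drop {α : Type} (p : α → Bool) (l : List α) :
    l.drop ((l.findIdx? p).getD l.length) = l.dropWhile (fun x => !p x) := by
  induction l with
  | nil => simp
  | cons x xs ih =>
    rw [List.findIdx?_cons]
    by_cases h : p x
    · simp [h, List.dropWhile_cons]
    · rw [if_neg h]
      cases hfi : xs.findIdx? p with
      | none =>
        rw [hfi] at ih
        simp only [Option.getD_none] at ih
        simp [h, ih]
      | some i =>
        rw [hfi] at ih
        simp only [Option.getD_some] at ih
        simp [h, ih]

theorem pvSegments_cons (h : String) (t : List String) :
    pvSegments (h :: t) = (h :: t.takeWhile (fun x => !pvTitle x)) :: pvSegments (t.dropWhile (fun x => !pvTitle x)) := by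
  rw [pvSegments]
  rw [show (fun l => PySem.Str.startswith l "Title:") = pvTitle from rfl]
  rw [pvIdx_take pvTitle t, pvIdx_drop pvTitle t]

theorem pvFlatB_cons (h : String) (t : List String) :
    pvFlatB (h :: t) = pvEmit (pvSegDict (h :: t.takeWhile (fun x => !pvTitle x)))
      ++ pvFlatB (t.dropWhile (fun x => !pvTitle x)) := by
  unfold pvFlatB
  rw [pvSegments_cons, List.flatMap_cons]

theorem pvRest_shape (t : List String) :
    (t.dropWhile (fun x => !pvTitle x) = [] ∨
     ∃ h' t', t.dropWhile (fun x => !pvTitle x) = h' :: t' ∧ pvTitle h' = true) := by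
  cases hd : t.dropWhile (fun x => !pvTitle x) with
  | nil => exact Or.inl rfl
  | cons y ys =>
    refine Or.inr ⟨y, ys, rfl, ?_⟩
    have hne : t.dropWhile (fun x => !pvTitle x) ≠ [] := by simp [hd]
    have := List.head_dropWhile_not (fun x => !pvTitle x) hne
    simp only [hd, List.head_cons, Bool.not_eq_eq_eq_not] at this
    simpa using this

theorem pvTakeW_notitle (t : List String) :
    ∀ l ∈ t.takeWhile (fun x => !pvTitle x), pvTitle l = false := by
  intro l hl
  have := List.mem_takeWhile_imp hl
  simpa using this

-- for a title-headed chunk, A's fresh {'title': v} dict filled by the chunk tail is B's segment dict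
theorem pvChunkDict_title (h : String) (hh : pvTitle h = true) (pre : List String) :
    pre.foldl pvFStep (PySem.Dict.ofList [("title", PySem.Str.strip (PySem.Str.replace h "Title:" ""))])
      = pvSegDict (h :: pre) := by
  rw [pvSegDict_fold]
  have hstep : pvFStep PySem.Dict.empty h
      = PySem.Dict.ofList [("title", PySem.Str.strip (PySem.Str.replace h "Title:" ""))] := by
    unfold pvFStep pvField
    rw [show PySem.Str.startswith h "Title:" = true from hh]
    rfl
  rw [List.foldl_cons, hstep]

theorem pvMain1 (n : Nat) : ∀ (ls : List String), ls.length ≤ n →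
    (ls = [] ∨ ∃ h t, ls = h :: t ∧ pvTitle h = true) →
    ∀ cur, pvH cur ls = pvEmit cur ++ pvFlatB ls := by
  induction n with
  | zero =>
    intro ls hlen _ cur
    have hnil : ls = [] := List.eq_nil_of_length_eq_zero (Nat.le_zero.mp hlen)
    subst hnil
    simp [pvH, pvFlatB, pvSegments]
  | succ n ih =>
    intro ls hlen hht cur
    rcases hht with rfl | ⟨h, t, rfl, hh⟩
    · simp [pvH, pvFlatB, pvSegments]
    · rw [pvFlatB_cons]
      have hsplit : t.takeWhile (fun x => !pvTitle x) ++ t.dropWhile (fun x => !pvTitle x) = t :=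
        List.takeWhile_append_dropWhile
      calc pvH cur (h :: t)
          = pvEmit cur ++ pvH (PySem.Dict.ofList
              [("title", PySem.Str.strip (PySem.Str.replace h "Title:" ""))]) t := by
            simp [pvH, hh]
        _ = pvEmit cur ++ pvH (pvSegDict (h :: t.takeWhile (fun x => !pvTitle x)))
              (t.dropWhile (fun x => !pvTitle x)) := by
            have key : pvH (PySem.Dict.ofList
                [("title", PySem.Str.strip (PySem.Str.replace h "Title:" ""))]) t
                = pvH (pvSegDict (h :: t.takeWhile (fun x => !pvTitle x)))
                    (t.dropWhile (fun x => !pvTitle x)) := by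
              conv_lhs => rw [← hsplit]
              rw [pvH_fill _ _ _ (pvTakeW_notitle t), pvChunkDict_title h hh]
            rw [key]
        _ = pvEmit cur ++ (pvEmit (pvSegDict (h :: t.takeWhile (fun x => !pvTitle x)))
              ++ pvFlatB (t.dropWhile (fun x => !pvTitle x))) := by
            rw [ih _ ?_ (pvRest_shape t)]
            calc (t.dropWhile (fun x => !pvTitle x)).length
                ≤ t.length := List.length_dropWhile_le _ _
              _ ≤ n := by simpa using hlen

theorem pvMain2 (ls : List String) : pvH PySem.Dict.empty ls = pvFlatB ls := by
  have hempty : pvEmit PySem.Dict.empty = [] := rfl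
  cases ls with
  | nil => simp [pvH, pvFlatB, pvSegments, hempty]
  | cons h t =>
    by_cases hh : pvTitle h
    · rw [pvMain1 (h :: t).length (h :: t) le_rfl (Or.inr ⟨h, t, rfl, hh⟩), hempty,
        List.nil_append]
    · have hsplit : t.takeWhile (fun x => !pvTitle x) ++ t.dropWhile (fun x => !pvTitle x) = t :=
        List.takeWhile_append_dropWhile
      rw [pvFlatB_cons]
      calc pvH PySem.Dict.empty (h :: t)
          = pvH (pvFStep PySem.Dict.empty h) t := by simp [pvH, hh]
        _ = pvH (pvSegDict (h :: t.takeWhile (fun x => !pvTitle x)))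
              (t.dropWhile (fun x => !pvTitle x)) := by
            have key : pvH (pvFStep PySem.Dict.empty h) t
                = pvH (pvSegDict (h :: t.takeWhile (fun x => !pvTitle x)))
                    (t.dropWhile (fun x => !pvTitle x)) := by
              conv_lhs => rw [← hsplit]
              rw [pvH_fill _ _ _ (pvTakeW_notitle t), pvSegDict_fold, List.foldl_cons]
            rw [key]
        _ = pvEmit (pvSegDict (h :: t.takeWhile (fun x => !pvTitle x)))
              ++ pvFlatB (t.dropWhile (fun x => !pvTitle x)) := by
            exact pvMain1 _ _ le_rfl (pvRest_shape t) _

theorem pvFoldB (segs : List (List String)) (acc : List (PySem.Dict String String)) :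
    segs.foldl (fun acc seg =>
      let d := pvSegDict seg
      if d.items ≠ [] then acc ++ [d] else acc) acc
      = acc ++ segs.flatMap (fun seg => pvEmit (pvSegDict seg)) := by
  have hstep : (fun (acc : List (PySem.Dict String String)) seg =>
      let d := pvSegDict seg
      if d.items ≠ [] then acc ++ [d] else acc)
      = fun acc seg => acc ++ pvEmit (pvSegDict seg) := by
    funext a sg
    dsimp only [pvEmit]
    split_ifs <;> simp
  rw [hstep]
  exact PySem.List.foldl_append_eq_flatMap _ _ _

-- ===== VERDICT (by name: the statement is the Claim_ definition above) =====
theorem parse_subplots_py_spec : Claim_equal_parse_subplots_py := by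
  intro t _
  unfold Spec_parse_subplots_py parse_subplots_py parse_subplots_py_alt
  dsimp only
  rw [pvFoldA_eq, pvFoldB, pvMain2]
  simp [pvFlatB]
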